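-- pv_equiv track=rewrite | github.com/kho/mr-mira | scripts/mr.py | format_task_ids
-- ===== SOURCE A (Python) =====
-- def format_task_ids(ids):
--     parts = []
--     low = ids[0]
--     high = low
--     for i in ids[1:]:
--         if i != high + 1:
--             parts.append(str(low) if low == high else ('%d-%d' % (low, high)))
--             low = i
--         high = i
--     parts.append(str(low) if low == high else ('%d-%d' % (low, high)))
--     return ','.join(parts)
-- ===== SOURCE B (Python) =====
-- def format_task_ids(ids):
--     # pass 1: compute the break positions (indices where a new run starts), plus the end sentinel
--     n = len(ids)
--     cuts = [k for k in range(n) if k == 0 or ids[k] != ids[k - 1] + 1] + [n]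
--     # pass 2: each adjacent pair of cuts delimits one run ids[s:e]; format it by its endpoints
--     return ','.join(
--         str(ids[s]) if ids[s] == ids[e - 1] else '%d-%d' % (ids[s], ids[e - 1])
--         for s, e in zip(cuts, cuts[1:]))
-- ===== Notes on version B (the rewrite author's own statement) =====
-- stated objective: alternative
-- what changed: B replaces A's single stateful scan (tracking low/high with a flush) by a two-phase index computation: a comprehension first collects all run-break positions (cuts), then each adjacent cut pair is formatted from the endpoints ids[s], ids[e-1].
import Mathlib
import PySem

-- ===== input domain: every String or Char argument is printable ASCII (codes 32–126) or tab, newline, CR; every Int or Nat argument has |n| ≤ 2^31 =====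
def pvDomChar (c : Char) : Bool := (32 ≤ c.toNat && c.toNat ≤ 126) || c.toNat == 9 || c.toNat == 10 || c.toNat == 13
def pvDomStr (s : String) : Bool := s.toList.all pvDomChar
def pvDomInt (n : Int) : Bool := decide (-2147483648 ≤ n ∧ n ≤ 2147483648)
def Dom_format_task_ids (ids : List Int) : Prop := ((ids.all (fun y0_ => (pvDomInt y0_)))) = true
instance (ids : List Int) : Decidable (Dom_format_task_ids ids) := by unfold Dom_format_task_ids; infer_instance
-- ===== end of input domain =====

-- B computes all run-break positions first and then formats each cut pair from ids' endpoints, instead of A's single stateful scan; objective: alternative two-phase algorithm, same cost. On the empty list A raises IndexError while B returns "" (excluded by Pre_).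


-- shared by both Pythons: str(lo) if lo == hi else '%d-%d' % (lo, hi)
def fmtRun (lo hi : Int) : String :=
  if lo = hi then PySem.Int.toStr lo
  else PySem.Int.toStr lo ++ "-" ++ PySem.Int.toStr hi

-- ===== PORT A =====
-- A's loop state: (parts, low, high); ids[0] raises IndexError on [] (excluded by Pre_)
def stepA (st : List String × Int × Int) (i : Int) : List String × Int × Int :=
  if i ≠ st.2.2 + 1 then (st.1 ++ [fmtRun st.2.1 st.2.2], i, i) else (st.1, st.2.1, i)

def format_task_ids (ids : List Int) : String :=
  match ids with
  | [] => ""   -- Python raises IndexError here; outside Pre_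
  | first :: rest =>
    let st := rest.foldl stepA ([], first, first)
    PySem.Str.join "," (st.1 ++ [fmtRun st.2.1 st.2.2])

-- ===== PORT B =====
-- every index Python B uses (k, k-1 with k ≥ 1, s, e-1 with e a later cut) is in range, so List.getD is exact for ids[...]
def format_task_ids_alt (ids : List Int) : String :=
  let n := ids.length
  let cuts := ((List.range n).filter
--  k == 0 or ids[k] != ids[k-1] + 1
      (fun k => k == 0 || !(ids.getD k 0 == ids.getD (k - 1) 0 + 1))) ++ [n]
--  cuts[1:] = cuts.drop 1 (exact: nonnegative bound); zip(cuts, cuts[1:])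
  PySem.Str.join ","
    ((cuts.zip (cuts.drop 1)).map (fun p => fmtRun (ids.getD p.1 0) (ids.getD (p.2 - 1) 0)))

-- ===== PRECONDITION & SPEC =====
-- Pre_ excludes only the empty list, on which Python A raises IndexError (ids[0]).
def Pre_format_task_ids (ids : List Int) : Prop := ids ≠ []
instance (ids : List Int) : Decidable (Pre_format_task_ids ids) := by unfold Pre_format_task_ids; infer_instance
def pvWitness_format_task_ids : List Int := [1, 2, 3, 7]

def Spec_format_task_ids (ids : List Int) (out : String) : Prop := out = format_task_ids_alt ids
instance (ids : List Int) (out : String) : Decidable (Spec_format_task_ids ids out) := by unfold Spec_format_task_ids; infer_instance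

-- ===== CLAIM (what is proved, stated in full; the proofs are below) =====
def Claim_equal_format_task_ids : Prop := ∀ (ids : List Int), Dom_format_task_ids ids → Pre_format_task_ids ids → Spec_format_task_ids ids (format_task_ids ids)

-- ===== LEMMAS AND PROOFS =====

-- the common semantic middle ground: the list of maximal consecutive runs of ids
def consRun (lo hi : Int) : List (Int × Int) → List (Int × Int)
  | [] => [(lo, hi)]
  | (a, b) :: s => if a = hi + 1 then (lo, b) :: s else (lo, hi) :: (a, b) :: s

def runsR : List Int → List (Int × Int)
  | [] => []
  | x :: t => consRun x x (runsR t)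

theorem runsR_head (x : Int) (t : List Int) : ∃ h r, runsR (x :: t) = (x, h) :: r := by
  show ∃ h r, consRun x x (runsR t) = (x, h) :: r
  cases runsR t with
  | nil => exact ⟨x, [], rfl⟩
  | cons p s =>
    obtain ⟨a, b⟩ := p
    by_cases hab : a = x + 1
    · exact ⟨b, s, by simp [consRun, hab]⟩
    · exact ⟨x, (a, b) :: s, by simp [consRun, hab]⟩

-- ----- A side -----
-- A's scan state (lo, hi, remaining) as a run list
def runsGo (lo hi : Int) : List Int → List (Int × Int)
  | [] => [(lo, hi)]
  | x :: t => if x = hi + 1 then runsGo lo x t else (lo, hi) :: runsGo x x t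

theorem foldA_eq (rest : List Int) : ∀ (acc : List String) (lo hi : Int),
    (let st := rest.foldl stepA (acc, lo, hi); st.1 ++ [fmtRun st.2.1 st.2.2])
      = acc ++ (runsGo lo hi rest).map (fun r => fmtRun r.1 r.2) := by
  induction rest with
  | nil => intro acc lo hi; simp [runsGo]
  | cons x t ih =>
    intro acc lo hi
    simp only [List.foldl_cons, runsGo]
    by_cases h : x = hi + 1
    · have : stepA (acc, lo, hi) x = (acc, lo, x) := by simp [stepA, h]
      rw [this, ih acc lo x]; simp [h]
    · have : stepA (acc, lo, hi) x = (acc ++ [fmtRun lo hi], x, x) := by simp [stepA, h]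
      rw [this, ih (acc ++ [fmtRun lo hi]) x x]; simp [h]

theorem runsGo_eq (rest : List Int) : ∀ (lo hi : Int),
    runsGo lo hi rest = consRun lo hi (runsR rest) := by
  induction rest with
  | nil => intro lo hi; rfl
  | cons x t ih =>
    intro lo hi
    simp only [runsGo, runsR, ih]
    cases hr : runsR t with
    | nil =>
      by_cases h : x = hi + 1 <;> simp [consRun, h]
    | cons p s =>
      obtain ⟨a, b⟩ := p
      by_cases hax : a = x + 1 <;> by_cases hxh : x = hi + 1
      · simp only [consRun, hax, hxh]; simp [consRun]
      · simp only [consRun, hax, hxh]; simp [consRun, hxh]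
      · rw [hxh] at hax; simp only [consRun, hax, hxh]; simp [consRun, hax]
      · simp only [consRun, hax, hxh]; simp [consRun, hax, hxh]

-- ----- B side -----
-- break positions of the tail, given the previous value and the current absolute index
def cutsFrom (prev : Int) (idx : Nat) : List Int → List Nat
  | [] => []
  | y :: t => if y ≠ prev + 1 then idx :: cutsFrom y (idx + 1) t else cutsFrom y (idx + 1) t

theorem drop_getD (ids : List Int) (start : Nat) (x : Int) (t : List Int)
    (h : ids.drop start = x :: t) : ids.getD start 0 = x := by
  have h0 : (ids.drop start)[0]? = some x := by rw [h]; rfl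
  rw [List.getElem?_drop] at h0
  have h0' : ids[start]? = some x := by simpa using h0
  simp [List.getD_eq_getElem?_getD, h0']

theorem drop_succ (ids : List Int) (start : Nat) (x : Int) (t : List Int)
    (h : ids.drop start = x :: t) : ids.drop (start + 1) = t := by
  have := congrArg List.tail h
  simpa [List.tail_drop] using this

theorem drop_length (ids : List Int) (start : Nat) (x : Int) (t : List Int)
    (h : ids.drop start = x :: t) : ids.length = start + 1 + t.length := by
  have := congrArg List.length h
  simp [List.length_drop] at this
  omega

-- the filtered range is exactly cutsFrom
theorem filter_range' (ids : List Int) (t : List Int) : ∀ (x : Int) (start : Nat),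
    ids.drop start = x :: t →
    (List.range' (start + 1) t.length).filter
        (fun k => k == 0 || !(ids.getD k 0 == ids.getD (k - 1) 0 + 1))
      = cutsFrom x (start + 1) t := by
  induction t with
  | nil => intro x start _; rfl
  | cons y t' ih =>
    intro x start h
    have hx : ids.getD start 0 = x := drop_getD ids start x _ h
    have h1 : ids.drop (start + 1) = y :: t' := drop_succ ids start x _ h
    have hy : ids.getD (start + 1) 0 = y := drop_getD ids (start + 1) y _ h1
    have hrec := ih y (start + 1) h1
    simp only [List.length_cons, List.range'_succ, List.filter_cons, cutsFrom]
    have hne : ((start + 1 : Nat) == 0) = false := by simp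
    have e1 : start + 1 - 1 = start := rfl
    by_cases hbr : y = x + 1
    · have hc : ((start + 1 == 0 || !(ids.getD (start + 1) 0 == ids.getD (start + 1 - 1) 0 + 1)) = false) := by
        rw [e1, hx, hy, hbr]; simp
      simp only [hc, Bool.false_eq_true, if_false, hrec, hbr]
      simp [cutsFrom]
    · have hc : ((start + 1 == 0 || !(ids.getD (start + 1) 0 == ids.getD (start + 1 - 1) 0 + 1)) = true) := by
        rw [e1, hx, hy]; simp [hbr]
      simp only [hc, if_true, hrec]
      simp [cutsFrom, hbr]

-- mapping each adjacent cut pair to its run endpoints yields exactly the runs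
theorem pairs_eq (ids : List Int) (t : List Int) : ∀ (x : Int) (start : Nat),
    ids.drop start = x :: t →
    ((start :: (cutsFrom x (start + 1) t ++ [ids.length])).zip
        (cutsFrom x (start + 1) t ++ [ids.length])).map
      (fun p => (ids.getD p.1 0, ids.getD (p.2 - 1) 0))
      = runsR (x :: t) := by
  induction t with
  | nil =>
    intro x start h
    have hx : ids.getD start 0 = x := drop_getD ids start x _ h
    have hlen : ids.length = start + 1 := by
      have := drop_length ids start x [] h; simpa using this
    simp only [cutsFrom, List.nil_append, List.zip_cons_cons, List.zip_nil_right,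
      List.map_cons, List.map_nil, runsR, consRun]
    rw [hlen, Nat.add_sub_cancel, hx]
  | cons y t' ih =>
    intro x start h
    have hx : ids.getD start 0 = x := drop_getD ids start x _ h
    have h1 : ids.drop (start + 1) = y :: t' := drop_succ ids start x _ h
    have hrec := ih y (start + 1) h1
    obtain ⟨hh, r, hhead⟩ := runsR_head y t'
    -- destructure the inner cut list (nonempty since it ends with [ids.length])
    cases hcs : cutsFrom y (start + 1 + 1) t' ++ [ids.length] with
    | nil => exact absurd hcs (by simp)
    | cons r0 rest' =>
      rw [hcs, hhead] at hrec
      simp only [List.zip_cons_cons, List.map_cons, List.cons.injEq, Prod.mk.injEq] at hrec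
      obtain ⟨⟨hy', hr0⟩, hM⟩ := hrec
      show ((start :: (cutsFrom x (start + 1) (y :: t') ++ [ids.length])).zip
          (cutsFrom x (start + 1) (y :: t') ++ [ids.length])).map
          (fun p => (ids.getD p.1 0, ids.getD (p.2 - 1) 0)) = consRun x x (runsR (y :: t'))
      rw [hhead]
      by_cases hbr : y = x + 1
      · -- run continues: no cut at start+1; first pair is (start, r0)
        have hcf : cutsFrom x (start + 1) (y :: t') = cutsFrom y (start + 1 + 1) t' := by
          simp [cutsFrom, hbr]
        rw [hcf, hcs]
        simp only [List.zip_cons_cons, List.map_cons, hM, hx, hr0, consRun]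
        simp [hbr]
      · -- run breaks at start+1: first pair is (start, start+1)
        have hcf : cutsFrom x (start + 1) (y :: t') = (start + 1) :: cutsFrom y (start + 1 + 1) t' := by
          simp [cutsFrom, hbr]
        rw [hcf, List.cons_append, hcs]
        simp only [List.cons_append, List.zip_cons_cons, List.map_cons, hM, hx, hr0, hy',
          Nat.add_sub_cancel, consRun]
        simp [hbr]

-- ===== VERDICT (by name: the statement is the Claim_ definition above) =====
theorem format_task_ids_spec : Claim_equal_format_task_ids := by
  intro ids _ hpre
  unfold Spec_format_task_ids
  match ids with
  | [] => exact absurd rfl hpre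
  | x :: rest =>
    show format_task_ids (x :: rest) = format_task_ids_alt (x :: rest)
    unfold format_task_ids format_task_ids_alt
    simp only []
    -- A's side: join of the formatted runs
    rw [foldA_eq rest [] x x, runsGo_eq rest x x]
    -- B's side: evaluate the cuts
    have hdrop0 : (x :: rest).drop 0 = x :: rest := rfl
    have hfilter : (List.range (x :: rest).length).filter
        (fun k => k == 0 || !((x :: rest).getD k 0 == (x :: rest).getD (k - 1) 0 + 1))
        = 0 :: cutsFrom x 1 rest := by
      have : (x :: rest).length = rest.length + 1 := by simp
      rw [this, List.range_eq_range', List.range'_succ, List.filter_cons]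
      simp only [show ((0 : Nat) == 0 || !((x :: rest).getD 0 0 == (x :: rest).getD (0 - 1) 0 + 1)) = true from by simp, if_true]
      rw [filter_range' (x :: rest) rest x 0 hdrop0]
    rw [hfilter]
    have hpairs := pairs_eq (x :: rest) rest x 0 hdrop0
    simp only [Nat.reduceAdd] at hpairs
    congr 1
    simp only [List.cons_append, List.drop_one, List.tail_cons, List.nil_append]
    rw [show consRun x x (runsR rest) = runsR (x :: rest) from rfl, ← hpairs, List.map_map]
    rfl
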